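-- pv_equiv track=rewrite | github.com/k-harada/AtCoder | other_contests/zone2021_b/B.py | solve
-- ===== SOURCE A (Python) =====
-- def solve(h, w, a):
--     is_prime = [1] * 1000
--     is_prime[0] = 0
--     is_prime[1] = 0
--     for p in range(1000):
--         if not is_prime[p]:
--             continue
--         for q in range(p * p, 1000, p):
--             is_prime[q] = 0
--     res = 0
--     for i in range(h):
--         for j in range(w):
--             if is_prime[a[i][j]]:
--                 res += 1
--     return res
-- ===== SOURCE B (Python) =====
-- def solve(h, w, a):
--     def is_prime(n):
--         if n < 2:
--             return False
--         d = 2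
--         while d * d <= n:
--             if n % d == 0:
--                 return False
--             d += 1
--         return True
--     table = [is_prime(n) for n in range(1000)]
--     return sum(1 for i in range(h) for j in range(w) if table[a[i][j]])
-- ===== Notes on version B (the rewrite author's own statement) =====
-- stated objective: alternative
-- what changed: The 1000-entry primality table is built by per-number trial division (while d*d <= n) instead of a sieve of Eratosthenes, and the counting double loop becomes a single generator-sum over the grid.
import Mathlib
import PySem

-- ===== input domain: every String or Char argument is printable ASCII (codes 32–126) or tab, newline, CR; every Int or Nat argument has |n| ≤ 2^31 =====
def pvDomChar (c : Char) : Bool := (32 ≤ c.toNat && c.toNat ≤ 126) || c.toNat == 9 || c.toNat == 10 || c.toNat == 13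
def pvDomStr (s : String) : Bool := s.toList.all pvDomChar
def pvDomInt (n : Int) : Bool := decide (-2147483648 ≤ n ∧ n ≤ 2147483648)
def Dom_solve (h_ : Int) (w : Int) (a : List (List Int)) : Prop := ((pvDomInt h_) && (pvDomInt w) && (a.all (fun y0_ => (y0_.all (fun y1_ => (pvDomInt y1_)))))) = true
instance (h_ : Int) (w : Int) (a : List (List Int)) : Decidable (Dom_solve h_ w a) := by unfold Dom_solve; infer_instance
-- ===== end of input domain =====

-- B builds the same 1000-entry primality table by trial division instead of a sieve of
-- Eratosthenes, and counts prime-valued cells with a single generator-sum; objective: alternative.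


-- ===== PORT A =====
-- A-side helper: the sieve-of-Eratosthenes table A builds (is_prime, 1000 Int entries).
def sieveTable : List Int :=
  ((List.replicate 1000 (1 : Int)).set 0 0 |>.set 1 0 : List Int) |>
    fun ip0 => (PySem.List.pyRange 0 1000 1).foldl (fun ip p =>
      if PySem.List.pyGetD ip p 0 == 0 then ip
      else (PySem.List.pyRange (p * p) 1000 p).foldl
        (fun ip q => PySem.List.pySetD ip q 0) ip) ip0

-- Port of A. The pyGetD defaults are never reached on inputs satisfying Pre_solve
-- (Pre_solve excludes exactly the IndexError inputs).
def solve (h_ : Int) (w : Int) (a : List (List Int)) : Int :=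
  (PySem.List.pyRange 0 h_ 1).foldl (fun res i =>
    (PySem.List.pyRange 0 w 1).foldl (fun res j =>
      if PySem.List.pyGetD sieveTable
           (PySem.List.pyGetD (PySem.List.pyGetD a i []) j 0) 0 != 0
      then res + 1 else res) res) 0

-- ===== PORT B =====
-- B-side helper: the 'while d * d <= n' trial-division loop; the fuel bounds the
-- iteration count (n.toNat always suffices) and is never exhausted on B's calls.
def tdLoop (fuel : Nat) (n : Int) (d : Int) : Bool :=
  match fuel with
  | 0 => true
  | fuel + 1 =>
    if d * d ≤ n then
      (if PySem.Int.mod n d == 0 then false else tdLoop fuel n (d + 1))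
    else true

def isPrimeTD (n : Int) : Bool := if n < 2 then false else tdLoop n.toNat n 2

-- B-side helper: table = [is_prime(n) for n in range(1000)]
def tdTable : List Bool := (PySem.List.pyRange 0 1000 1).map isPrimeTD

def solve_alt (h_ : Int) (w : Int) (a : List (List Int)) : Int :=
  (((PySem.List.pyRange 0 h_ 1).flatMap (fun i =>
      (PySem.List.pyRange 0 w 1).filter (fun j =>
        PySem.List.pyGetD tdTable
          (PySem.List.pyGetD (PySem.List.pyGetD a i []) j 0) false))).length : Int)

-- ===== PRECONDITION & SPEC =====
-- Pre_solve is exactly the inputs on which the Python A returns: when w ≤ 0 the inner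
-- loop body (the only indexing) never runs and A always returns; otherwise A raises
-- IndexError iff h exceeds len(a), w exceeds the length of a visited row, or a visited
-- cell value lies outside [-1000, 999] ([-1000, -1] are legal negative indices and wrap).
def Pre_solve (h_ : Int) (w : Int) (a : List (List Int)) : Prop :=
  0 < w →
  h_ ≤ (a.length : Int) ∧
  ∀ row ∈ a.take h_.toNat, w ≤ (row.length : Int) ∧
    ∀ v ∈ row.take w.toNat, -1000 ≤ v ∧ v < 1000
instance (h_ : Int) (w : Int) (a : List (List Int)) : Decidable (Pre_solve h_ w a) := by
  unfold Pre_solve; infer_instance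

def pvWitness_solve : Int × Int × List (List Int) := (2, 2, [[2, 3], [4, 997]])

def Spec_solve (h_ : Int) (w : Int) (a : List (List Int)) (out : Int) : Prop := out = solve_alt h_ w a
instance (h_ : Int) (w : Int) (a : List (List Int)) (out : Int) : Decidable (Spec_solve h_ w a out) := by unfold Spec_solve; infer_instance

-- ===== CLAIM (what is proved, stated in full; the proofs are below) =====
def Claim_equal_solve : Prop := ∀ (h_ : Int) (w : Int) (a : List (List Int)), Dom_solve h_ w a → Pre_solve h_ w a → Spec_solve h_ w a (solve h_ w a)

-- ===== LEMMAS AND PROOFS =====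

-- n ≥ 2 is composite iff it has a factor m with 2 ≤ m and m² ≤ n.
lemma small_factor_iff (k : Nat) (hk : 2 ≤ k) :
    (∃ m : Nat, 2 ≤ m ∧ m ∣ k ∧ m * m ≤ k) ↔ ¬ Nat.Prime k := by
  constructor
  · rintro ⟨m, hm2, hdvd, hsq⟩ hp
    rcases (Nat.Prime.eq_one_or_self_of_dvd hp m hdvd) with h | h
    · omega
    · subst h; nlinarith
  · intro hnp
    refine ⟨k.minFac, (Nat.minFac_prime (by omega)).two_le, Nat.minFac_dvd k, ?_⟩
    nlinarith [Nat.minFac_sq_le_self (show 0 < k by omega) hnp]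

lemma prime_factor_iff (k : Nat) (hk : 2 ≤ k) :
    (∃ p : Nat, Nat.Prime p ∧ p ∣ k ∧ p * p ≤ k) ↔ ¬ Nat.Prime k := by
  constructor
  · rintro ⟨p, hp, hdvd, hsq⟩
    exact (small_factor_iff k hk).1 ⟨p, hp.two_le, hdvd, hsq⟩
  · intro hnp
    obtain ⟨m, hm2, hdvd, hsq⟩ := (small_factor_iff k hk).2 hnp
    refine ⟨m.minFac, Nat.minFac_prime (by omega), (Nat.minFac_dvd m).trans hdvd, ?_⟩
    have h1 : m.minFac ≤ m := Nat.minFac_le (by omega)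
    nlinarith

-- ===== B side: the trial-division loop decides primality =====
lemma tdLoop_iff (fuel : Nat) (n d : Int) (hd : 2 ≤ d) (hfuel : n < d + fuel) :
    tdLoop fuel n d = true ↔ ∀ e : Int, d ≤ e → e * e ≤ n → ¬ (e ∣ n) := by
  induction fuel generalizing d with
  | zero =>
    simp only [tdLoop, true_iff]
    intro e he hsq
    have h1 : n < d := by push_cast at hfuel; omega
    nlinarith
  | succ fuel ih =>
    simp only [tdLoop]
    by_cases hdd : d * d ≤ n
    · simp only [if_pos hdd]
      have hmod := PySem.Int.mod_eq_zero_iff_dvd n d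
      by_cases hv : d ∣ n
      · rw [if_pos (by simp [hmod.2 hv])]
        simp only [Bool.false_eq_true, false_iff]
        exact fun h => absurd hv (h d le_rfl hdd)
      · rw [if_neg (by simp only [beq_iff_eq]; exact fun h => hv (hmod.1 h))]
        rw [ih (d + 1) (by omega) (by push_cast at hfuel ⊢; omega)]
        constructor
        · intro h e he hsq hdvd
          rcases eq_or_lt_of_le he with rfl | hlt
          · exact hv hdvd
          · exact h e (by omega) hsq hdvd
        · intro h e he hsq hdvd
          exact h e (by omega) hsq hdvd
    · simp only [if_neg hdd, true_iff]
      intro e he hsq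
      have : d * d ≤ e * e := by nlinarith
      omega

lemma isPrimeTD_eq (k : Nat) : isPrimeTD (k : Int) = decide (Nat.Prime k) := by
  by_cases hk : 2 ≤ k
  · have h2 : ¬ ((k : Int) < 2) := by exact_mod_cast not_lt.2 (by omega : (2:Int) ≤ k)
    rw [isPrimeTD, if_neg h2]
    have hiff := tdLoop_iff (Int.toNat (k:Int)) (k:Int) 2 (by omega)
      (by rw [Int.toNat_natCast]; omega)
    by_cases hp : Nat.Prime k
    · simp only [hp, decide_true]
      refine hiff.2 ?_
      intro e he hsq hdvd
      have he0 : 0 ≤ e := by omega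
      have hm2 : 2 ≤ e.toNat := by omega
      have hmsq : e.toNat * e.toNat ≤ k := by
        have : ((e.toNat * e.toNat : Nat) : Int) ≤ (k : Int) := by
          push_cast; rw [Int.toNat_of_nonneg he0]; exact hsq
        exact_mod_cast this
      have hmdvd : e.toNat ∣ k := by
        have : (e.toNat : Int) ∣ (k : Int) := by rw [Int.toNat_of_nonneg he0]; exact hdvd
        exact_mod_cast this
      exact absurd hp ((small_factor_iff k hk).1 ⟨e.toNat, hm2, hmdvd, hmsq⟩)
    · simp only [hp, decide_false]
      rw [Bool.eq_false_iff]
      intro htrue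
      obtain ⟨m, hm2, hmdvd, hmsq⟩ := (small_factor_iff k hk).2 hp
      exact hiff.1 htrue (m : Int) (by exact_mod_cast hm2) (by exact_mod_cast hmsq)
        (by exact_mod_cast hmdvd)
  · rw [isPrimeTD, if_pos (by exact_mod_cast (by omega : (k:Int) < 2))]
    have : ¬ Nat.Prime k := fun h => absurd h.two_le (by omega)
    simp [this]

lemma tdTable_len : tdTable.length = 1000 := by
  rw [tdTable, List.length_map, PySem.List.length_pyRange_one]
  rfl

lemma tdTable_getD (k : Nat) (hk : k < 1000) :
    tdTable.getD k false = decide (Nat.Prime k) := by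
  have h := PySem.List.pyGetD_map_pyRange_of_nonneg isPrimeTD 1000 (k : Int) false
    (by positivity) (by exact_mod_cast hk)
  rw [PySem.List.pyGetD_natCast] at h
  exact h.trans (isPrimeTD_eq k)

-- ===== A side: the sieve invariant =====
-- k is crossed out once the outer loop has processed [0, t)
def Marked (t : Int) (k : Nat) : Prop :=
  ∃ p : Nat, (p : Int) < t ∧ Nat.Prime p ∧ p ∣ k ∧ p * p ≤ k

def SieveInv (t : Int) (ip : List Int) : Prop :=
  ip.length = 1000 ∧
  ∀ k : Nat, k < 1000 →
    ((2 ≤ k ∧ ¬ Marked t k) → ip.getD k 0 = 1) ∧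
    ((¬ (2 ≤ k ∧ ¬ Marked t k)) → ip.getD k 0 = 0)

-- one iteration of the outer sieve loop (proof-side name for A's loop body)
def sieveStep (ip : List Int) (p : Int) : List Int :=
  if PySem.List.pyGetD ip p 0 == 0 then ip
  else (PySem.List.pyRange (p * p) 1000 p).foldl
    (fun ip q => PySem.List.pySetD ip q 0) ip

-- effect of the inner loop 'for q in R: ip[q] = 0'
lemma setfold (L : List Int) (ip : List Int)
    (hL : ∀ q ∈ L, 0 ≤ q ∧ q < (ip.length : Int)) :
    (L.foldl (fun ip q => PySem.List.pySetD ip q 0) ip).length = ip.length ∧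
    ∀ k : Nat, k < ip.length →
      (L.foldl (fun ip q => PySem.List.pySetD ip q 0) ip).getD k 0
        = if (k : Int) ∈ L then 0 else ip.getD k 0 := by
  induction L generalizing ip with
  | nil => simp
  | cons q L ih =>
    obtain ⟨hq0, hqlt⟩ := hL q (List.mem_cons_self)
    have hset : PySem.List.pySetD ip q 0 = ip.set q.toNat 0 :=
      PySem.List.pySetD_of_nonneg ip 0 hq0
    have hlen : (ip.set q.toNat 0).length = ip.length := by simp
    have ih' := ih (ip.set q.toNat 0)
      (by rw [hlen]; exact fun r hr => hL r (List.mem_cons_of_mem _ hr))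
    constructor
    · simpa [hset, hlen] using ih'.1
    · intro k hk
      have h2 := ih'.2 k (by omega)
      simp only [List.foldl_cons, hset]
      rw [h2]
      have hgetset : (ip.set q.toNat 0).getD k 0 = if k = q.toNat then 0 else ip.getD k 0 := by
        rw [List.getD_eq_getElem?_getD, List.getD_eq_getElem?_getD, List.getElem?_set]
        by_cases h : q.toNat = k
        · simp [h, hk]
        · simp [h, Ne.symm h]
      by_cases hmem : (k : Int) ∈ L
      · simp [hmem]
      · have hiff : ((k : Int) = q ∨ (k : Int) ∈ L) ↔ k = q.toNat := by
          simp only [hmem, or_false]; omega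
        rw [if_neg hmem, hgetset]
        simp only [List.mem_cons, hiff]

lemma sieve_step_inv (t : Int) (ip : List Int) (h0 : 0 ≤ t) (h1 : t < 1000)
    (hinv : SieveInv t ip) : SieveInv (t + 1) (sieveStep ip t) := by
  obtain ⟨hlen, hch⟩ := hinv
  set tn := t.toNat with htn
  have htt : (tn : Int) = t := Int.toNat_of_nonneg h0
  have htn1000 : tn < 1000 := by omega
  have hget : PySem.List.pyGetD ip t 0 = ip.getD tn 0 := by
    rw [PySem.List.pyGetD_eq_getElem ip 0 h0 (by omega), List.getD_eq_getElem?_getD,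
      List.getElem?_eq_getElem (by omega)]
    rfl
  by_cases hzero : ip.getD tn 0 = 0
  · -- is_prime[t] == 0: skip; t is then not prime, so Marked (t+1) = Marked t
    have hnp : ¬ Nat.Prime tn := by
      intro hp
      have h2 : 2 ≤ tn := hp.two_le
      have hnm : ¬ Marked t tn := by
        rintro ⟨r, hrlt, hrp, hrdvd, hrsq⟩
        have hr2 := hrp.two_le
        rcases hp.eq_one_or_self_of_dvd r hrdvd with h | h
        · omega
        · omega
      have := (hch tn htn1000).1 ⟨h2, hnm⟩
      omega
    have hmeq : ∀ k, Marked (t + 1) k ↔ Marked t k := by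
      intro k
      constructor
      · rintro ⟨p, hplt, hpp, hpd, hps⟩
        by_cases hp : (p : Int) < t
        · exact ⟨p, hp, hpp, hpd, hps⟩
        · have hptn : p = tn := by omega
          exact absurd (hptn ▸ hpp) hnp
      · rintro ⟨p, hplt, hpp, hpd, hps⟩
        exact ⟨p, by omega, hpp, hpd, hps⟩
    have hstep : sieveStep ip t = ip := by
      rw [sieveStep, if_pos (by rw [hget]; simpa using hzero)]
    rw [hstep]
    refine ⟨hlen, fun k hk => ?_⟩
    have := hch k hk
    simp only [hmeq k]
    exact this
  · -- is_prime[t] nonzero: t is prime; its multiples from t*t get crossed out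
    have h2tn : 2 ≤ tn ∧ ¬ Marked t tn := by
      by_contra hc
      exact hzero ((hch tn htn1000).2 hc)
    have hprime : Nat.Prime tn := by
      by_contra hnp
      obtain ⟨r, hrp, hrd, hrs⟩ := (prime_factor_iff tn h2tn.1).2 hnp
      have hr2 := hrp.two_le
      have h2r : 2 * r ≤ r * r := Nat.mul_le_mul_right r hr2
      exact h2tn.2 ⟨r, by omega, hrp, hrd, hrs⟩
    have hL : ∀ q ∈ PySem.List.pyRange (t * t) 1000 t, 0 ≤ q ∧ q < (ip.length : Int) := by
      intro q hq
      rw [PySem.List.mem_pyRange_iff_of_pos (by omega)] at hq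
      constructor
      · nlinarith [hq.1]
      · rw [hlen]; exact_mod_cast hq.2.1
    have hstep : sieveStep ip t =
        (PySem.List.pyRange (t * t) 1000 t).foldl (fun ip q => PySem.List.pySetD ip q 0) ip := by
      rw [sieveStep, if_neg (by rw [hget]; simpa using hzero)]
    obtain ⟨hflen, hfget⟩ := setfold (PySem.List.pyRange (t * t) 1000 t) ip hL
    have hmemc : ∀ k : Nat, k < 1000 →
        (((k : Int) ∈ PySem.List.pyRange (t * t) 1000 t) ↔ (tn ∣ k ∧ tn * tn ≤ k)) := by
      intro k hk
      rw [PySem.List.mem_pyRange_iff_of_pos (by omega)]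
      have hdt : t ∣ t * t := dvd_mul_left t t
      constructor
      · rintro ⟨hle, -, hdvd⟩
        have hdk : t ∣ (k : Int) := by
          have := dvd_add hdvd hdt
          simpa using this
        rw [← htt] at hdk hle
        exact ⟨Int.natCast_dvd_natCast.1 hdk, by exact_mod_cast hle⟩
      · rintro ⟨hdvd, hle⟩
        have hle' : t * t ≤ (k : Int) := by rw [← htt]; exact_mod_cast hle
        have hdk : t ∣ (k : Int) := by rw [← htt]; exact_mod_cast hdvd
        exact ⟨hle', by exact_mod_cast hk, dvd_sub hdk hdt⟩
    have hmt : ∀ k : Nat, Marked (t + 1) k ↔ (Marked t k ∨ (tn ∣ k ∧ tn * tn ≤ k)) := by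
      intro k
      constructor
      · rintro ⟨p, hplt, hpp, hpd, hps⟩
        by_cases hp : (p : Int) < t
        · exact Or.inl ⟨p, hp, hpp, hpd, hps⟩
        · have : p = tn := by omega
          subst this
          exact Or.inr ⟨hpd, hps⟩
      · rintro (⟨p, hplt, hpp, hpd, hps⟩ | ⟨hd, hs⟩)
        · exact ⟨p, by omega, hpp, hpd, hps⟩
        · exact ⟨tn, by omega, hprime, hd, hs⟩
    rw [hstep]
    refine ⟨by rw [hflen, hlen], fun k hk => ?_⟩
    have hkl : k < ip.length := by omega
    rw [hfget k hkl]
    by_cases hmem : (k : Int) ∈ PySem.List.pyRange (t * t) 1000 t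
    · rw [if_pos hmem]
      have hmk : Marked (t + 1) k := (hmt k).2 (Or.inr ((hmemc k hk).1 hmem))
      exact ⟨fun h => absurd hmk h.2, fun _ => rfl⟩
    · rw [if_neg hmem]
      have hnd : ¬ (tn ∣ k ∧ tn * tn ≤ k) := fun h => hmem ((hmemc k hk).2 h)
      have : Marked (t + 1) k ↔ Marked t k := by
        rw [hmt k]
        exact or_iff_left hnd
      simp only [this]
      exact hch k hk

lemma sieve_base : SieveInv 0 ((List.replicate 1000 (1 : Int)).set 0 0 |>.set 1 0) := by
  constructor
  · rw [List.length_set, List.length_set, List.length_replicate]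
  · intro k hk
    have hnm : ¬ Marked 0 k := by
      rintro ⟨p, hplt, -, -, -⟩
      omega
    have hlen : ((List.replicate 1000 (1 : Int)).set 0 0 |>.set 1 0).length = 1000 := by
      rw [List.length_set, List.length_set, List.length_replicate]
    have hval : ((List.replicate 1000 (1 : Int)).set 0 0 |>.set 1 0).getD k 0
        = if k = 0 ∨ k = 1 then 0 else 1 := by
      rw [List.getD_eq_getElem?_getD, List.getElem?_eq_getElem (by omega)]
      rw [List.getElem_set]
      by_cases h1 : k = 1
      · simp [h1]
      · rw [if_neg (fun h => h1 h.symm)]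
        rw [List.getElem_set]
        by_cases h0 : k = 0
        · simp [h0]
        · rw [if_neg (fun h => h0 h.symm), List.getElem_replicate, if_neg (by omega)]
          rfl
    constructor
    · rintro ⟨h2, -⟩
      rw [hval, if_neg (by omega)]
    · intro hc
      have : k < 2 := by
        by_contra h
        exact hc ⟨by omega, hnm⟩
      rw [hval, if_pos (by omega)]

lemma sieve_outer (m : Nat) : ∀ (t : Int) (ip : List Int), 0 ≤ t → t + m = 1000 →
    SieveInv t ip → SieveInv 1000 ((PySem.List.pyRange t 1000 1).foldl sieveStep ip) := by
  induction m with
  | zero =>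
    intro t ip h0 hm hinv
    have : t = 1000 := by omega
    subst this
    rw [PySem.List.pyRange_one_eq_nil le_rfl]
    exact hinv
  | succ m ih =>
    intro t ip h0 hm hinv
    rw [PySem.List.pyRange_one_cons (by omega), List.foldl_cons]
    exact ih (t + 1) (sieveStep ip t) (by omega) (by push_cast at hm ⊢; omega)
      (sieve_step_inv t ip h0 (by omega) hinv)

lemma sieve_final : SieveInv 1000 sieveTable := by
  have : sieveTable = (PySem.List.pyRange 0 1000 1).foldl sieveStep
      ((List.replicate 1000 (1 : Int)).set 0 0 |>.set 1 0) := rfl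
  rw [this]
  exact sieve_outer 1000 0 _ le_rfl (by norm_num) sieve_base

lemma sieve_len : sieveTable.length = 1000 := sieve_final.1

lemma sieve_char (k : Nat) (hk : k < 1000) :
    sieveTable.getD k 0 = if Nat.Prime k then 1 else 0 := by
  obtain ⟨c1, c2⟩ := sieve_final.2 k hk
  have hm1000 : Marked 1000 k ↔ ∃ p : Nat, Nat.Prime p ∧ p ∣ k ∧ p * p ≤ k := by
    constructor
    · rintro ⟨p, -, hpp, hpd, hps⟩
      exact ⟨p, hpp, hpd, hps⟩
    · rintro ⟨p, hpp, hpd, hps⟩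
      have hp1 := hpp.two_le
      have : p ≤ p * p := Nat.le_mul_of_pos_left p (by omega)
      exact ⟨p, by omega, hpp, hpd, hps⟩
  by_cases hp : Nat.Prime k
  · rw [if_pos hp]
    refine c1 ⟨hp.two_le, fun hm => ?_⟩
    exact absurd hp ((prime_factor_iff k hp.two_le).1 (hm1000.1 hm))
  · rw [if_neg hp]
    refine c2 (fun ⟨h2, hnm⟩ => ?_)
    exact hnm (hm1000.2 ((prime_factor_iff k h2).2 hp))

-- ===== the two table lookups agree (including Python's negative-index wrap) =====
lemma getD_eq_getElem_of_lt {α : Type} (xs : List α) (d : α) (k : Nat) (h : k < xs.length) :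
    xs.getD k d = xs[k] := by
  rw [List.getD_eq_getElem?_getD, List.getElem?_eq_getElem h]
  rfl

lemma lookup_eq (v : Int) (h1 : -1000 ≤ v) (h2 : v < 1000) :
    (PySem.List.pyGetD sieveTable v 0 != 0) = PySem.List.pyGetD tdTable v false := by
  by_cases hv : 0 ≤ v
  · have hvN : v.toNat < 1000 := by omega
    rw [PySem.List.pyGetD_eq_getElem sieveTable 0 hv (by rw [sieve_len]; exact_mod_cast h2),
      PySem.List.pyGetD_eq_getElem tdTable false hv (by rw [tdTable_len]; exact_mod_cast h2)]
    rw [← getD_eq_getElem_of_lt sieveTable 0 v.toNat (by rw [sieve_len]; omega),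
      ← getD_eq_getElem_of_lt tdTable false v.toNat (by rw [tdTable_len]; omega)]
    rw [sieve_char v.toNat hvN, tdTable_getD v.toNat hvN]
    by_cases hp : Nat.Prime v.toNat
    · simp [hp]
    · simp [hp]
  · have hk0 : 0 < (-v).toNat := by omega
    have hk1 : (-v).toNat ≤ 1000 := by omega
    have hveq : v = -(((-v).toNat : Nat) : Int) := by omega
    rw [hveq,
      PySem.List.pyGetD_neg_natCast sieveTable (-v).toNat 0 hk0 (by rw [sieve_len]; omega),
      PySem.List.pyGetD_neg_natCast tdTable (-v).toNat false hk0 (by rw [tdTable_len]; omega)]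
    have hidx1 : sieveTable.length - (-v).toNat < 1000 := by rw [sieve_len]; omega
    have hidx2 : 1000 - (-v).toNat < 1000 := by omega
    simp only [sieve_len, tdTable_len]
    rw [← getD_eq_getElem_of_lt sieveTable 0 (1000 - (-v).toNat) (by rw [sieve_len]; omega),
      ← getD_eq_getElem_of_lt tdTable false (1000 - (-v).toNat) (by rw [tdTable_len]; omega)]
    rw [sieve_char _ hidx2, tdTable_getD _ hidx2]
    by_cases hp : Nat.Prime (1000 - (-v).toNat)
    · simp [hp]
    · simp [hp]

-- ===== counting: nested counting loop = length of the filtered flatMap =====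
lemma cast_sum_map {α : Type} (l : List α) (f : α → Nat) :
    (((l.map f).sum : Nat) : Int) = (l.map (fun x => ((f x : Nat) : Int))).sum := by
  induction l with
  | nil => rfl
  | cons x l ih => simp only [List.map_cons, List.sum_cons, Nat.cast_add, ih]

-- ===== VERDICT (by name: the statement is the Claim_ definition above) =====
theorem solve_spec : Claim_equal_solve := by
  intro h_ w a _hdom hpre
  unfold Spec_solve
  -- the cell predicate of A agrees with that of B on every visited cell
  have hcell : ∀ i ∈ PySem.List.pyRange 0 h_ 1, ∀ j ∈ PySem.List.pyRange 0 w 1,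
      (PySem.List.pyGetD sieveTable
          (PySem.List.pyGetD (PySem.List.pyGetD a i []) j 0) 0 != 0)
        = PySem.List.pyGetD tdTable
            (PySem.List.pyGetD (PySem.List.pyGetD a i []) j 0) false := by
    intro i hi j hj
    rw [PySem.List.mem_pyRange_one] at hi hj
    obtain ⟨hh, hrows⟩ := hpre (by omega)
    have hia : i < (a.length : Int) := lt_of_lt_of_le hi.2 hh
    have hrow : PySem.List.pyGetD a i [] = a[i.toNat]'(by omega) :=
      PySem.List.pyGetD_eq_getElem a [] hi.1 hia
    have hitake : i.toNat < (a.take h_.toNat).length := by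
      rw [List.length_take]; omega
    have hmem : a[i.toNat]'(by omega) ∈ a.take h_.toNat := by
      have : (a.take h_.toNat)[i.toNat]'hitake = a[i.toNat]'(by omega) := List.getElem_take
      rw [← this]
      exact List.getElem_mem hitake
    obtain ⟨hw, hvals⟩ := hrows _ hmem
    set row := a[i.toNat]'(by omega) with hrdef
    have hja : j < (row.length : Int) := lt_of_lt_of_le hj.2 hw
    have hcellv : PySem.List.pyGetD row j 0 = row[j.toNat]'(by omega) :=
      PySem.List.pyGetD_eq_getElem row 0 hj.1 hja
    have hjtake : j.toNat < (row.take w.toNat).length := by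
      rw [List.length_take]; omega
    have hvmem : row[j.toNat]'(by omega) ∈ row.take w.toNat := by
      have : (row.take w.toNat)[j.toNat]'hjtake = row[j.toNat]'(by omega) := List.getElem_take
      rw [← this]
      exact List.getElem_mem hjtake
    obtain ⟨hv1, hv2⟩ := hvals _ hvmem
    rw [hrow, hcellv]
    exact lookup_eq _ hv1 hv2
  -- rewrite A's nested loop into 0 + Σ_i countP, and B into the same sum
  unfold solve solve_alt
  have hA : ∀ (res : Int), ∀ i ∈ PySem.List.pyRange 0 h_ 1,
      (PySem.List.pyRange 0 w 1).foldl (fun res j =>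
        if PySem.List.pyGetD sieveTable
             (PySem.List.pyGetD (PySem.List.pyGetD a i []) j 0) 0 != 0
        then res + 1 else res) res
      = res + ((PySem.List.pyRange 0 w 1).countP (fun j =>
          PySem.List.pyGetD tdTable
            (PySem.List.pyGetD (PySem.List.pyGetD a i []) j 0) false) : Int) := by
    intro res i hi
    rw [PySem.List.foldl_if_add_one]
    congr 2
    exact List.countP_congr (fun j hj => by rw [hcell i hi j hj])
  rw [PySem.List.foldl_congr_mem _ _
      (fun res i => res + ((PySem.List.pyRange 0 w 1).countP (fun j =>
          PySem.List.pyGetD tdTable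
            (PySem.List.pyGetD (PySem.List.pyGetD a i []) j 0) false) : Int)) 0
      (fun res i hi => hA res i hi)]
  rw [PySem.List.foldl_add, zero_add]
  rw [List.length_flatMap, cast_sum_map]
  refine congrArg List.sum (List.map_congr_left ?_)
  intro i _
  rw [List.countP_eq_length_filter]
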